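-- pv_equiv track=rewrite | github.com/MachidelPino/introduccion-a-la-programacion | Python/practica7.py | notasAprobadas
-- ===== SOURCE A (Python) =====
-- def notasAprobadas(notas: [int]) -> bool:
--     calificacion: bool = False
--     for i in notas:
--         if(i >= 4):
--             calificacion = True
--         else:
--             return False
--     return calificacion
-- ===== SOURCE B (Python) =====
-- def notasAprobadas(notas: [int]) -> bool:
--     return bool(notas) and min(notas) >= 4
-- ===== Notes on version B (the rewrite author's own statement) =====
-- stated objective: idiomatic
-- what changed: Replaces the flag-setting early-return loop with an explicit emptiness test plus a single min-reduction compared once against the threshold.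
import Mathlib
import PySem

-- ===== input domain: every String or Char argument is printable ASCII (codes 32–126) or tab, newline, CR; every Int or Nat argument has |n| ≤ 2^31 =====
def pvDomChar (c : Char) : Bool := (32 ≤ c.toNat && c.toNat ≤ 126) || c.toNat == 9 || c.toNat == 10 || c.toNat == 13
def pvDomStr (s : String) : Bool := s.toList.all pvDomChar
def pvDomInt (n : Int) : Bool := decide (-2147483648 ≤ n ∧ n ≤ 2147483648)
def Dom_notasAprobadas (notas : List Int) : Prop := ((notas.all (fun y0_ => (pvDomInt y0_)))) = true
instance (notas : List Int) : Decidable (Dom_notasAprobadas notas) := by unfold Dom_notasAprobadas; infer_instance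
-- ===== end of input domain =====

-- ===== PORT A =====
-- A: flag 'calificacion' set-True / early-return-False loop, transliterated.
def notasAprobadasGo (notas : List Int) (calificacion : Bool) : Bool :=
  match notas with
  | [] => calificacion
  | i :: rest => if i ≥ 4 then notasAprobadasGo rest true else false

def notasAprobadas (notas : List Int) : Bool := notasAprobadasGo notas false

-- ===== PORT B =====
-- B: `bool(notas) and min(notas) >= 4` — emptiness test, then one min-reduction.
def notasAprobadas_alt (notas : List Int) : Bool :=
  !notas.isEmpty && (match PySem.List.min? notas (fun x => x) with
    | some m => decide (m ≥ 4)
    | none => false)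

-- ===== PRECONDITION & SPEC =====
def Spec_notasAprobadas (notas : List Int) (out : Bool) : Prop := out = notasAprobadas_alt notas
instance (notas : List Int) (out : Bool) : Decidable (Spec_notasAprobadas notas out) := by unfold Spec_notasAprobadas; infer_instance

-- ===== CLAIM (what is proved, stated in full; the proofs are below) =====
def Claim_equal_notasAprobadas : Prop := ∀ (notas : List Int), Dom_notasAprobadas notas → Spec_notasAprobadas notas (notasAprobadas notas)

-- ===== LEMMAS AND PROOFS =====

-- ===== VERDICT (by name: the statement is the Claim_ definition above) =====
theorem go_eq (notas : List Int) :
    ∀ cal : Bool, notasAprobadasGo notas cal =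
      (if notas = [] then cal else decide (∀ x ∈ notas, x ≥ 4)) := by
  induction notas with
  | nil => intro cal; simp [notasAprobadasGo]
  | cons i rest ih =>
    intro cal
    simp only [notasAprobadasGo, ih]
    by_cases h : i ≥ 4 <;> by_cases hr : rest = [] <;> simp_all

theorem foldl_min_ge (t : List Int) : ∀ x : Int,
    (4 ≤ t.foldl min x) ↔ (4 ≤ x ∧ ∀ y ∈ t, 4 ≤ y) := by
  induction t with
  | nil => intro x; simp
  | cons a r ih =>
    intro x
    simp only [List.foldl_cons, ih, le_min_iff, List.mem_cons]
    constructor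
    · rintro ⟨⟨hx, ha⟩, hr⟩
      exact ⟨hx, fun y hy => hy.elim (fun h => h ▸ ha) (hr y)⟩
    · rintro ⟨hx, h⟩
      exact ⟨⟨hx, h a (Or.inl rfl)⟩, fun y hy => h y (Or.inr hy)⟩

theorem alt_eq (notas : List Int) :
    notasAprobadas_alt notas =
      (if notas = [] then false else decide (∀ x ∈ notas, x ≥ 4)) := by
  match notas with
  | [] => simp [notasAprobadas_alt]
  | x :: t =>
    simp only [notasAprobadas_alt, PySem.List.min?_id_cons, List.isEmpty_cons,
      if_neg (List.cons_ne_nil x t)]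
    simp only [ge_iff_le, foldl_min_ge, List.mem_cons]
    by_cases hx : 4 ≤ x <;> by_cases ht : ∀ y ∈ t, 4 ≤ y <;> simp_all

theorem notasAprobadas_spec : Claim_equal_notasAprobadas := by
  intro notas _
  unfold Spec_notasAprobadas notasAprobadas
  rw [go_eq, alt_eq]
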